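-- pv_equiv track=rewrite | github.com/cszaiti/SDP | vulberta/pattern.py | extractStr
-- ===== SOURCE A (Python) =====
-- def extractStr(tokens):
--     # 初始化两个空字典，用于存储mask到token和token到mask的映射
--     mask2token, token2mask = {}, {}
--     # 初始化一个空列表，用于存储处理后的tokens
--     result = []
--     # 初始化一个计数器，用于生成mask
--     cnt = 0
--     # 遍历输入的tokens
--     for token in tokens:
--         # 检查token是否包含单引号或双引号，表示它可能是一个字符串
--         if "'" in token or '"' in token:
--             # 如果token在token2mask字典中不存在
--             if token2mask.get(token) == None:
--                 # 生成一个mask，格式为<_str%d_>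
--                 mask = "<_str%d_>"%cnt
--                 # 将token映射到mask
--                 token2mask[token] = mask
--                 # 将mask映射到token
--                 mask2token[mask] = token
--                 # 计数器加1
--                 cnt += 1
--             # 将token的mask添加到结果列表中
--             result.append(token2mask[token])
--         else:
--             # 如果token不是字符串，则直接添加到结果列表中
--             result.append(token)
--     # 返回处理后的tokens列表、mask到token的映射字典和token到mask的映射字典
--     return result, token2mask, mask2token
-- ===== SOURCE B (Python) =====
-- def extractStr(tokens):
--     tokens = list(tokens)
--     # Dedup the quoted tokens into a list; a token's mask number is its POSITION in it.
--     order = []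
--     for t in tokens:
--         if ("'" in t or '"' in t) and t not in order:
--             order.append(t)
--     # Output: positional lookup via list.index (always present for quoted tokens).
--     result = [("<_str%d_>" % order.index(t)) if ("'" in t or '"' in t) else t
--               for t in tokens]
--     # Both mapping dicts are derived afterwards by enumerating the order list.
--     token2mask = {t: "<_str%d_>" % i for i, t in enumerate(order)}
--     mask2token = {"<_str%d_>" % i: t for i, t in enumerate(order)}
--     return result, token2mask, mask2token
-- ===== Notes on version B (the rewrite author's own statement) =====
-- stated objective: alternative
-- what changed: B replaces A's incrementally-built hash tables with a positional scheme: it dedups quoted tokens into an ordered list, numbers each occurrence by its position in that list (list.index), and derives both mapping dicts afterwards by enumerating the list; A maintains the dicts inside a single output-building loop.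
import Mathlib
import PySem

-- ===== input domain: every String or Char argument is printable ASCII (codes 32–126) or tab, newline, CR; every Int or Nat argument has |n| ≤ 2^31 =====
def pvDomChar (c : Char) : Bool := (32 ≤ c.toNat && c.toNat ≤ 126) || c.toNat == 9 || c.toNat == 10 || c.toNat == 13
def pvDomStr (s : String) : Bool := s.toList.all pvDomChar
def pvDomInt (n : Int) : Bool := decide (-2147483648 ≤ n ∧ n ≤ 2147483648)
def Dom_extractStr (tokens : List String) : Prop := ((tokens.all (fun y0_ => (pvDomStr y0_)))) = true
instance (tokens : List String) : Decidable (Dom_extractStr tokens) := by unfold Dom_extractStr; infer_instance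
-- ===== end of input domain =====

-- B numbers quoted tokens by their POSITION in an ordered dedup list (list.index) and derives
-- both mapping dicts afterwards by enumeration, instead of A's dicts maintained inside the
-- output loop (objective: alternative algorithm/data structure, same practical cost).


-- shared by both ports: "'" in token or '"' in token
def pvHasQuote (t : String) : Bool := PySem.Str.isIn "'" t || PySem.Str.isIn "\"" t

-- "<_str%d_>" % cnt  (hand-ported %d formatting: exact, PySem.Int.toStr is str(cnt))
def pvMask (cnt : Int) : String := "<_str" ++ PySem.Int.toStr cnt ++ "_>"

-- ===== PORT A =====
-- state: (result, token2mask, mask2token, cnt); one loop, literal transliteration of A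
def extractStrLoop :
    List String →
    List String × PySem.Dict String String × PySem.Dict String String × Int →
    List String × PySem.Dict String String × PySem.Dict String String × Int
  | [], st => st
  | token :: ts, (result, t2m, m2t, cnt) =>
    if pvHasQuote token then
      if t2m.get? token = none then
        -- token2mask[token] = mask; mask2token[mask] = token; cnt += 1; result.append(token2mask[token])
        extractStrLoop ts
          (result ++ [(t2m.insert token (pvMask cnt)).getD token ""],
           t2m.insert token (pvMask cnt), m2t.insert (pvMask cnt) token, cnt + 1)
      else
        extractStrLoop ts (result ++ [t2m.getD token ""], t2m, m2t, cnt)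
    else
      extractStrLoop ts (result ++ [token], t2m, m2t, cnt)

def extractStr (tokens : List String) :
    List String × (List (String × String)) × (List (String × String)) :=
  let st := extractStrLoop tokens ([], PySem.Dict.empty, PySem.Dict.empty, 0)
  (st.1, st.2.1.items, st.2.2.1.items)

-- ===== PORT B =====
-- the dedup loop: distinct quoted tokens in first-appearance order
def bOrder : List String → List String → List String
  | [], acc => acc
  | t :: ts, acc => bOrder ts (if pvHasQuote t && !(acc.contains t) then acc ++ [t] else acc)

-- token2mask = {t: "<_str%d_>" % i for i, t in enumerate(order)}
def bT2M (order : List String) : PySem.Dict String String :=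
  (PySem.List.enumerate order).foldl (fun d p => d.insert p.2 (pvMask p.1)) PySem.Dict.empty

-- mask2token = {"<_str%d_>" % i: t for i, t in enumerate(order)}
def bM2T (order : List String) : PySem.Dict String String :=
  (PySem.List.enumerate order).foldl (fun d p => d.insert (pvMask p.1) p.2) PySem.Dict.empty

def extractStr_alt (tokens : List String) :
    List String × (List (String × String)) × (List (String × String)) :=
  let order := bOrder tokens []
  -- order.index(t): a quoted token is always in order, so Python's .index never raises; getD 0 unreachable
  (tokens.map (fun t =>
      if pvHasQuote t then pvMask (((PySem.List.index? order t).getD 0 : Nat) : Int) else t),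
   (bT2M order).items, (bM2T order).items)

-- ===== PRECONDITION & SPEC =====
def Spec_extractStr (tokens : List String) (out : List String × (List (String × String)) × (List (String × String))) : Prop := out = extractStr_alt tokens
instance (tokens : List String) (out : List String × (List (String × String)) × (List (String × String))) : Decidable (Spec_extractStr tokens out) := by unfold Spec_extractStr; infer_instance

-- ===== CLAIM (what is proved, stated in full; the proofs are below) =====
def Claim_equal_extractStr : Prop := ∀ (tokens : List String), Dom_extractStr tokens → Spec_extractStr tokens (extractStr tokens)

-- ===== LEMMAS AND PROOFS =====

-- the dedup list only grows by appending
lemma bOrder_prefix (ts : List String) :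
    ∀ (o : List String), ∃ ext, bOrder ts o = o ++ ext := by
  induction ts with
  | nil => intro o; exact ⟨[], by simp [bOrder]⟩
  | cons t ts ih =>
    intro o
    simp only [bOrder]
    by_cases hc : (pvHasQuote t && !(o.contains t)) = true
    · obtain ⟨ext, he⟩ := ih (o ++ [t])
      refine ⟨t :: ext, ?_⟩
      rw [if_pos hc]; simpa using he
    · obtain ⟨ext, he⟩ := ih o
      refine ⟨ext, ?_⟩
      rw [if_neg hc]; exact he

-- appending one fresh element to `order` appends one insert to each dict
lemma bT2M_append (o : List String) (t : String) :
    bT2M (o ++ [t]) = (bT2M o).insert t (pvMask o.length) := by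
  simp [bT2M, PySem.List.enumerate_append, List.foldl_append]

lemma bM2T_append (o : List String) (t : String) :
    bM2T (o ++ [t]) = (bM2T o).insert (pvMask o.length) t := by
  simp [bM2T, PySem.List.enumerate_append, List.foldl_append]

-- presence in the token2mask dict = presence in the order list
lemma bT2M_contains (o : List String) (t : String) :
    (bT2M o).contains t = o.contains t := by
  induction o using List.reverseRecOn with
  | nil => simp [bT2M, PySem.List.enumerate]
  | append_singleton o u ih =>
    rw [bT2M_append]
    simp only [PySem.Dict.contains_insert, ih]
    by_cases h : t = u <;> simp [h]

-- value in token2mask = mask of the position in `order` (needs Nodup: insert overwrites)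
lemma bT2M_getD (o : List String) (t : String) (hn : o.Nodup) (hm : t ∈ o) :
    (bT2M o).getD t "" = pvMask (((PySem.List.index? o t).getD 0 : Nat) : Int) := by
  induction o using List.reverseRecOn with
  | nil => exact absurd hm (List.not_mem_nil)
  | append_singleton o u ih =>
    have hn' : o.Nodup := (List.nodup_append.mp hn).1
    have hu : u ∉ o := by
      have h2 := (List.nodup_append.mp hn).2.2
      simp at h2
      intro hmem
      exact h2 u hmem rfl
    rw [bT2M_append]
    by_cases he : t = u
    · subst he
      rw [PySem.Dict.getD_insert_self, PySem.List.index?_append_singleton_self _ _ hu]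
      rfl
    · have hm' : t ∈ o := by
        rcases List.mem_append.mp hm with h | h
        · exact h
        · simp at h; exact absurd h he
      rw [PySem.Dict.getD_insert_of_ne _ _ _ he,
        PySem.List.index?_append_of_mem _ hm', ih hn' hm']

-- the state invariant: A's loop from state encoded by a nodup `order` list
lemma loop_eq (ts : List String) :
    ∀ (res : List String) (o : List String), o.Nodup →
    extractStrLoop ts (res, bT2M o, bM2T o, (o.length : Int)) =
      (res ++ ts.map (fun t =>
         if pvHasQuote t then pvMask (((PySem.List.index? (bOrder ts o) t).getD 0 : Nat) : Int) else t),
       bT2M (bOrder ts o), bM2T (bOrder ts o), ((bOrder ts o).length : Int)) := by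
  induction ts with
  | nil => intro res o _; simp [extractStrLoop, bOrder]
  | cons t ts ih =>
    intro res o hn
    by_cases hq : pvHasQuote t = true
    · by_cases hc : o.contains t = true
      · -- seen before: dict hit, order unchanged
        have hm : t ∈ o := by simpa using hc
        have hnone : ¬ (bT2M o).get? t = none := by
          rw [PySem.Dict.get?_eq_none_iff_contains, bT2M_contains, hc]; simp
        have hord : bOrder (t :: ts) o = bOrder ts o := by
          simp only [bOrder]
          rw [if_neg (by simp [hm] : ¬ (pvHasQuote t && !(o.contains t)) = true)]
        obtain ⟨ext, hext⟩ := bOrder_prefix ts o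
        have hidx : PySem.List.index? (bOrder ts o) t = PySem.List.index? o t := by
          rw [hext, PySem.List.index?_append_of_mem _ hm]
        simp only [extractStrLoop, hq, if_true, hnone, if_false, List.map_cons, hord]
        rw [ih _ _ hn, bT2M_getD o t hn hm, hidx]
        simp
      · -- fresh quoted token
        have hc' : o.contains t = false := by simpa using hc
        have hnone : (bT2M o).get? t = none := by
          rw [PySem.Dict.get?_eq_none_iff_contains, bT2M_contains]; simpa using hc
        have hnotm : t ∉ o := by simpa using hc'
        have hord : bOrder (t :: ts) o = bOrder ts (o ++ [t]) := by
          simp only [bOrder]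
          rw [if_pos (by simp [hq, hnotm] : (pvHasQuote t && !(o.contains t)) = true)]
        have hn' : (o ++ [t]).Nodup := by
          simp only [List.nodup_append, List.nodup_singleton, true_and, hn]
          simp only [List.mem_singleton]
          exact fun a ha b hb hab => hnotm ((hab.trans hb) ▸ ha)
        obtain ⟨ext, hext⟩ := bOrder_prefix ts (o ++ [t])
        have hidx : PySem.List.index? (bOrder ts (o ++ [t])) t = some o.length := by
          rw [hext,
            PySem.List.index?_append_of_mem (l := o ++ [t]) ext (by simp),
            PySem.List.index?_append_singleton_self _ _ hnotm]
        simp only [extractStrLoop, hq, if_true, hnone, List.map_cons, hord]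
        have hlen : ((o.length : Int) + 1) = (((o ++ [t]).length : Nat) : Int) := by
          simp
        rw [← bT2M_append, ← bM2T_append, hlen, ih _ _ hn', hidx]
        rw [bT2M_getD (o ++ [t]) t hn' (by simp),
          PySem.List.index?_append_singleton_self _ _ hnotm]
        simp
    · -- unquoted token: copied through
      have hq' : pvHasQuote t = false := by simpa using hq
      have hord : bOrder (t :: ts) o = bOrder ts o := by
        simp only [bOrder]
        rw [if_neg (by simp [hq'])]
      simp only [extractStrLoop, hq', Bool.false_eq_true, if_false, List.map_cons, hord]
      rw [ih _ _ hn]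
      simp

-- ===== VERDICT (by name: the statement is the Claim_ definition above) =====
theorem extractStr_spec : Claim_equal_extractStr := by
  intro tokens _
  unfold Spec_extractStr extractStr extractStr_alt
  show (let st := extractStrLoop tokens ([], PySem.Dict.empty, PySem.Dict.empty, 0);
    (st.1, st.2.1.items, st.2.2.1.items)) = _
  have h0 : extractStrLoop tokens ([], PySem.Dict.empty, PySem.Dict.empty, 0)
      = extractStrLoop tokens ([], bT2M [], bM2T [], ((([] : List String).length : Nat) : Int)) := by
    rfl
  rw [h0, loop_eq tokens [] [] List.nodup_nil]
  rfl
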